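-- pv_equiv track=rewrite | github.com/francosalvucci14/Esercizi_ASD | Esami/Esame 27-09-23/SolES3.py | CreaOracolo
-- ===== SOURCE A (Python) =====
-- def CreaOracolo(A):
--     i=0
--     c=0
--     j=0
--     n = len(A)
--     O = [0]*n
--     while i<n:
--         if A[i] == 0:
--             c+=1
--         else:
--             while j<i:
--                 O[j] = c
--                 j+=1
--             c = 0
--             j+=1
--         i+=1
--     return O
-- ===== SOURCE B (Python) =====
-- def CreaOracolo(A):
--     # Phase 1: run-length encode A into maximal groups (is_zero, length).
--     groups = []
--     for x in A:
--         key = (x == 0)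
--         if groups and groups[-1][0] == key:
--             b, k = groups[-1]
--             groups[-1] = (b, k + 1)
--         else:
--             groups.append((key, 1))
--     # Phase 2: emit each group; a zero-run gets its own length unless it is the last group.
--     out = []
--     for idx, (is_zero, length) in enumerate(groups):
--         last = (idx == len(groups) - 1)
--         if is_zero and not last:
--             out += [length] * length
--         else:
--             out += [0] * length
--     return out
-- ===== Notes on version B (the rewrite author's own statement) =====
-- stated objective: alternative
-- what changed: A streams once over the array, filling earlier slots with a lagging pointer when it meets a nonzero; B first run-length encodes the array into maximal (is_zero, length) groups and then emits each group as a block ([len]*len for a non-final zero-run, [0]*len otherwise).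
import Mathlib
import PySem

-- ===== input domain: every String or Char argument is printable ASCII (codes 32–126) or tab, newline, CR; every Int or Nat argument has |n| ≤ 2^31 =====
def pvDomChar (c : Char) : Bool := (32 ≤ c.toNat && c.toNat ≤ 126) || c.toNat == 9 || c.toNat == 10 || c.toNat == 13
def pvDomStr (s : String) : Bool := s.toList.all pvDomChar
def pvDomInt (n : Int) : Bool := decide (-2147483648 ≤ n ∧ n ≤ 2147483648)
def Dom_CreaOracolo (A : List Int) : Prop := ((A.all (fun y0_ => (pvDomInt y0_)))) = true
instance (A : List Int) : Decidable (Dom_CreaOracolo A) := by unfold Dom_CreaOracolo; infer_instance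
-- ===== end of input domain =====

-- B replaces A's streaming fill with a lagging pointer by a two-phase run-length
-- encoding (groups first, then per-group emission); objective: alternative, same O(n) cost.

-- ===== PORT A =====
-- inner 'while j<i: O[j]=c; j+=1'
def pvInnerA (O : List Int) (j i : Nat) (c : Int) : List Int :=
  if j < i then pvInnerA (O.set j c) (j+1) i c else O
termination_by i - j

-- outer 'while i<n' loop; A[i] is read only when 0 ≤ i < n, so getD's default is never used
def pvOuterA (A : List Int) (n i : Nat) (c : Int) (j : Nat) (O : List Int) : List Int :=
  if i < n then
    if A.getD i 0 = 0 then pvOuterA A n (i+1) (c+1) j O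
    else pvOuterA A n (i+1) 0 (i+1) (pvInnerA O j i c)
  else O
termination_by n - i

def CreaOracolo (A : List Int) : List Int :=
  pvOuterA A A.length 0 0 0 (List.replicate A.length 0)

-- ===== PORT B =====
-- phase 1 of Source B: the groups list is built left to right, merging into the current
-- last group; the accumulator here holds the groups in reverse (head = last group)
def pvRunsRev (acc : List (Bool × Nat)) : List Int → List (Bool × Nat)
  | [] => acc
  | x :: xs =>
    match acc with
    | (b, k) :: rest =>
      if decide (x = 0) = b then pvRunsRev ((b, k+1) :: rest) xs
      else pvRunsRev ((decide (x = 0), 1) :: (b, k) :: rest) xs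
    | [] => pvRunsRev [(decide (x = 0), 1)] xs

-- phase 2 of Source B: 'idx == len(groups)-1' ⟺ the remaining group list is empty
def pvEmitB : List (Bool × Nat) → List Int
  | [] => []
  | (b, k) :: rest =>
    (if b && !rest.isEmpty then List.replicate k (k : Int) else List.replicate k 0) ++ pvEmitB rest

def CreaOracolo_alt (A : List Int) : List Int := pvEmitB ((pvRunsRev [] A).reverse)

-- ===== PRECONDITION & SPEC =====
def Spec_CreaOracolo (A : List Int) (out : List Int) : Prop := out = CreaOracolo_alt A
instance (A : List Int) (out : List Int) : Decidable (Spec_CreaOracolo A out) := by unfold Spec_CreaOracolo; infer_instance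

-- ===== CLAIM (what is proved, stated in full; the proofs are below) =====
def Claim_equal_CreaOracolo : Prop := ∀ (A : List Int), Dom_CreaOracolo A → Spec_CreaOracolo A (CreaOracolo A)

-- ===== LEMMAS AND PROOFS =====

-- the common specification: c pending zeros, remaining suffix
def specF (c : Nat) : List Int → List Int
  | [] => List.replicate c 0
  | x :: xs => if x = 0 then specF (c+1) xs else List.replicate c (c : Int) ++ 0 :: specF 0 xs

-- right-recursive run-length encoding (proof-side view of pvRunsRev)
def consRun (b : Bool) (k : Nat) (gs : List (Bool × Nat)) : List (Bool × Nat) :=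
  match gs with
  | (b', k') :: rest => if b = b' then (b, k + k') :: rest else (b, k) :: (b', k') :: rest
  | [] => [(b, k)]

def runsR : List Int → List (Bool × Nat)
  | [] => []
  | x :: xs => consRun (decide (x = 0)) 1 (runsR xs)

-- proof-side emitter with a pending-zeros counter
def pad (c : Nat) : List (Bool × Nat) → List Int
  | [] => List.replicate c 0
  | (b, k) :: rest =>
    if b then pad (c + k) rest
    else List.replicate c (c : Int) ++ List.replicate k 0 ++ pad 0 rest

theorem pvInnerA_eq (O : List Int) (j i : Nat) (c : Int) (hji : j ≤ i) (hi : i ≤ O.length) :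
    pvInnerA O j i c = O.take j ++ List.replicate (i - j) c ++ O.drop i := by
  rw [pvInnerA]
  by_cases h : j < i
  · rw [if_pos h]
    have hjl : j < O.length := lt_of_lt_of_le h hi
    rw [pvInnerA_eq (O.set j c) (j+1) i c h (by simpa using hi)]
    have h1 : (O.set j c).take (j+1) = O.take j ++ [c] := by
      rw [List.take_add_one, List.take_set_of_le (le_refl j)]
      simp [List.getElem?_set_self, hjl]
    have h2 : (O.set j c).drop i = O.drop i := List.drop_set_of_lt h
    have h3 : List.replicate (i - j) c = c :: List.replicate (i - (j+1)) c := by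
      have : i - j = (i - (j+1)) + 1 := by omega
      rw [this, List.replicate_succ]
    rw [h1, h2, h3]
    simp
  · rw [if_neg h]
    have : i = j := by omega
    subst this
    simp [List.take_append_drop]
termination_by i - j

theorem pvOuterA_eq (A : List Int) (i j : Nat) (O : List Int)
    (hji : j ≤ i) (hi : i ≤ A.length) (hO : O.length = A.length)
    (hz : ∀ p, j ≤ p → p < A.length → O.getD p 0 = 0) :
    pvOuterA A A.length i ((i - j : Nat) : Int) j O = O.take j ++ specF (i - j) (A.drop i) := by
  rw [pvOuterA]
  by_cases h : i < A.length
  · rw [if_pos h]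
    have hAi : A.getD i 0 = A[i] := List.getD_eq_getElem A 0 h
    have hdrop : A.drop i = A[i] :: A.drop (i+1) := (List.getElem_cons_drop h).symm
    by_cases h0 : A[i] = 0
    · rw [if_pos (by rw [hAi]; exact h0)]
      have hc : ((i - j : Nat) : Int) + 1 = (((i+1) - j : Nat) : Int) := by omega
      rw [hc, pvOuterA_eq A (i+1) j O (by omega) h hO hz]
      have : specF (i - j) (A.drop i) = specF ((i+1) - j) (A.drop (i+1)) := by
        rw [hdrop, specF, if_pos h0]
        congr 1
        omega
      rw [this]
    · rw [if_neg (by rw [hAi]; exact h0)]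
      set O' := pvInnerA O j i ((i - j : Nat) : Int) with hO'
      have hiO : i ≤ O.length := by omega
      have hIe : O' = O.take j ++ List.replicate (i - j) ((i - j : Nat) : Int) ++ O.drop i :=
        pvInnerA_eq O j i _ hji hiO
      have hlen : O'.length = A.length := by
        rw [hIe]; simp; omega
      have hz' : ∀ p, i+1 ≤ p → p < A.length → O'.getD p 0 = 0 := by
        intro p hp hpl
        rw [List.getD_eq_getElem?_getD, hIe,
          List.getElem?_append_right (by simp; omega), List.getElem?_drop]
        rw [show i + (p - (List.take j O ++ List.replicate (i - j) ((i - j : Nat) : Int)).length)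
            = p by simp; omega]
        rw [← List.getD_eq_getElem?_getD]
        exact hz p (by omega) hpl
      have hrec := pvOuterA_eq A (i+1) (i+1) O' (le_refl _) h hlen hz'
      simp only [Nat.sub_self, Int.natCast_zero] at hrec
      rw [hrec]
      have hOi0 : O[i]'(by omega) = 0 := by
        rw [← List.getD_eq_getElem O 0 (by omega)]
        exact hz i hji h
      have hOd : O.drop i = O[i]'(by omega) :: O.drop (i+1) := (List.getElem_cons_drop (by omega)).symm
      have htake : O'.take (i+1) = O.take j ++ List.replicate (i - j) ((i - j : Nat) : Int) ++ [(0:Int)] := by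
        rw [hIe, List.take_append]
        rw [List.take_of_length_le (by simp; omega)]
        rw [show i + 1 - (List.take j O ++ List.replicate (i - j) ((i - j : Nat) : Int)).length
            = 1 by simp; omega]
        rw [hOd, hOi0]
        simp
      rw [htake, hdrop, specF, if_neg h0]
      simp
  · rw [if_neg h]
    have hieq : i = A.length := by omega
    have hdrop : A.drop i = [] := by rw [hieq]; simp
    rw [hdrop]
    have hrep : O.drop j = List.replicate (i - j) (0 : Int) := by
      apply List.ext_getElem
      · simp; omega
      · intro t h1 h2
        have h1' : t < i - j := by simp only [List.length_drop] at h1; omega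
        simp only [List.getElem_drop, List.getElem_replicate]
        rw [← List.getD_eq_getElem O 0 (by omega)]
        exact hz _ (by omega) (by omega)
    conv_lhs => rw [← List.take_append_drop j O]
    rw [hrep]
    simp [specF]
termination_by A.length - i

theorem creaOracolo_eq_specF (A : List Int) : CreaOracolo A = specF 0 A := by
  rw [CreaOracolo]
  have h := pvOuterA_eq A 0 0 (List.replicate A.length 0) (le_refl 0) (by omega) (by simp)
    (by intro p _ hp; simp [List.getD_eq_getElem?_getD, List.getElem?_replicate, hp])
  simpa using h

theorem consRun_merge (b : Bool) (k : Nat) (gs : List (Bool × Nat)) :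
    consRun b k (consRun b 1 gs) = consRun b (k+1) gs := by
  match gs with
  | [] => simp [consRun]
  | (b', k') :: rest =>
    by_cases h : b = b' <;> simp [consRun, h] <;> omega

theorem consRun_ne (b b' : Bool) (k : Nat) (gs : List (Bool × Nat)) (h : b ≠ b') :
    consRun b k (consRun b' 1 gs) = (b, k) :: consRun b' 1 gs := by
  match gs with
  | [] => simp [consRun, h]
  | (c', m) :: rest =>
    by_cases h2 : b' = c'
    · subst h2; simp [consRun, h]
    · simp [consRun, h2, h]

theorem pvRunsRev_eq (xs : List Int) : ∀ (b : Bool) (k : Nat) (rest : List (Bool × Nat)),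
    pvRunsRev ((b, k) :: rest) xs = (consRun b k (runsR xs)).reverse ++ rest := by
  induction xs with
  | nil => intro b k rest; simp [pvRunsRev, runsR, consRun]
  | cons x xs ih =>
    intro b k rest
    by_cases h : decide (x = 0) = b
    · rw [show pvRunsRev ((b, k) :: rest) (x :: xs) = pvRunsRev ((b, k+1) :: rest) xs by
        simp [pvRunsRev, h]]
      rw [ih, runsR, h, consRun_merge]
    · rw [show pvRunsRev ((b, k) :: rest) (x :: xs)
            = pvRunsRev ((decide (x = 0), 1) :: (b, k) :: rest) xs by
        simp [pvRunsRev, h]]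
      rw [ih, runsR, consRun_ne b (decide (x = 0)) k (runsR xs) (fun hh => h hh.symm)]
      simp

theorem pvRunsRev_nil (xs : List Int) : (pvRunsRev [] xs).reverse = runsR xs := by
  match xs with
  | [] => simp [pvRunsRev, runsR]
  | x :: xs =>
    rw [show pvRunsRev [] (x :: xs) = pvRunsRev [(decide (x = 0), 1)] xs by simp [pvRunsRev]]
    rw [pvRunsRev_eq, runsR]
    simp

theorem chain'_consRun (b : Bool) (k : Nat) (gs : List (Bool × Nat))
    (h : List.IsChain (fun a c => a.1 ≠ c.1) gs) :
    List.IsChain (fun a c => a.1 ≠ c.1) (consRun b k gs) := by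
  match gs with
  | [] => simp [consRun]
  | (b', k') :: rest =>
    by_cases hb : b = b'
    · subst hb
      simp only [consRun, if_pos rfl]
      exact List.isChain_cons.mpr ⟨(List.isChain_cons.mp h).1, (List.isChain_cons.mp h).2⟩
    · simp only [consRun, if_neg hb]
      exact List.isChain_cons.mpr ⟨by simpa using hb, h⟩

theorem chain'_runsR (xs : List Int) : List.IsChain (fun a c => a.1 ≠ c.1) (runsR xs) := by
  induction xs with
  | nil => simp [runsR]
  | cons x xs ih => exact chain'_consRun _ _ _ ih

theorem pad_consRun_true (gs : List (Bool × Nat)) (c : Nat) :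
    pad c (consRun true 1 gs) = pad (c+1) gs := by
  match gs with
  | [] => simp [consRun, pad]
  | (b', k') :: rest =>
    cases b' <;> simp [consRun, pad] <;> ring_nf

theorem pad_consRun_false (gs : List (Bool × Nat)) (c : Nat) :
    pad c (consRun false 1 gs) = List.replicate c (c : Int) ++ 0 :: pad 0 gs := by
  match gs with
  | [] => simp [consRun, pad, List.replicate]
  | (b', k') :: rest =>
    cases b' <;> simp [consRun, pad, Nat.add_comm 1 k', List.replicate_succ]

theorem specF_eq_pad (xs : List Int) : ∀ c, specF c xs = pad c (runsR xs) := by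
  induction xs with
  | nil => intro c; simp [specF, runsR, pad]
  | cons x xs ih =>
    intro c
    by_cases h : x = 0
    · rw [show specF c (x :: xs) = specF (c+1) xs by simp [specF, h]]
      rw [ih, runsR, h]
      simp [pad_consRun_true]
    · rw [show specF c (x :: xs) = List.replicate c (c : Int) ++ 0 :: specF 0 xs by
        simp [specF, h]]
      rw [ih, runsR, show decide (x = 0) = false by simp [h], pad_consRun_false]

theorem pad_eq_emit (gs : List (Bool × Nat)) (h : List.IsChain (fun a c => a.1 ≠ c.1) gs) :
    pad 0 gs = pvEmitB gs := by
  match gs with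
  | [] => rfl
  | (false, k) :: rest =>
    have ih := pad_eq_emit rest (List.isChain_cons.mp h).2
    simp [pad, pvEmitB, ih]
  | (true, k) :: [] =>
    simp [pad, pvEmitB]
  | (true, k) :: (b', m) :: rest' =>
    have hb : b' = false := by
      have := (List.isChain_cons.mp h).1
      cases b' <;> simp_all
    subst hb
    have ih := pad_eq_emit rest' (List.isChain_cons.mp (List.isChain_cons.mp h).2).2
    simp [pad, pvEmitB, ih]
termination_by gs.length

theorem creaOracolo_alt_eq_specF (A : List Int) : CreaOracolo_alt A = specF 0 A := by
  rw [CreaOracolo_alt, pvRunsRev_nil, ← pad_eq_emit _ (chain'_runsR A), specF_eq_pad]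

-- ===== VERDICT (by name: the statement is the Claim_ definition above) =====
theorem CreaOracolo_spec : Claim_equal_CreaOracolo := by
  intro A _
  unfold Spec_CreaOracolo
  rw [creaOracolo_eq_specF, creaOracolo_alt_eq_specF]
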